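-- pv_equiv track=rewrite | github.com/Cyuport/LeetCode | 腾讯2020校园招聘-后台-逛街.py | view
-- ===== SOURCE A (Python) =====
-- def view(n: int, h: [int]) -> [int]:
--     v = []
--     right, left = [0]*n, [0]*n
--     stack_r, stack_l = [], []
--     for i in range(n-1,-1,-1): #向右看
--         right[i] = len(stack_r)
--         if i == n-1:
--             stack_r.append(h[i])
--         elif h[i]<stack_r[-1]:
--             stack_r.append(h[i])
--         else:
--             while len(stack_r) and h[i]>=stack_r[-1]:
--                 stack_r.pop()
--             stack_r.append(h[i])
--
--     for i in range(n):
--         left[i] = len(stack_l)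
--         if i == 0:
--             stack_l.append(h[i])
--         elif h[i]<stack_l[-1]:
--             stack_l.append(h[i])
--         else:
--             while len(stack_l) and h[i]>=stack_l[-1]:
--                 stack_l.pop()
--             stack_l.append(h[i])
--
--
--     for i in range(n):
--         v.append(left[i]+right[i]+1)
--     return v
-- ===== SOURCE B (Python) =====
-- def _chain(n, h):
--     # nxt[j]: index of the next strictly greater height to the right of j, else -1,
--     # found by jumping along already-computed nxt pointers (no stack)
--     nxt = [-1] * n
--     for j in range(n - 2, -1, -1):
--         k = j + 1
--         while k != -1 and h[k] <= h[j]: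
--             k = nxt[k]
--         nxt[j] = k
--     # c[j]: how many buildings are visible looking right from just before position j
--     c = [0] * n
--     for j in range(n - 1, -1, -1):
--         c[j] = 1 + (c[nxt[j]] if nxt[j] != -1 else 0)
--     return c
--
-- def view(n, h):
--     cr = _chain(n, h)
--     cl = _chain(n, h[:n][::-1])
--     cl.reverse()
--     out = []
--     for i in range(n):
--         r = cr[i + 1] if i + 1 < n else 0
--         l = cl[i - 1] if i - 1 >= 0 else 0
--         out.append(l + r + 1)
--     return out
-- ===== Notes on version B (the rewrite author's own statement) =====
-- stated objective: alternative
-- what changed: Replaces A's two monotonic stacks and index arrays with a stack-free scheme: jump-pointer 'next strictly greater' arrays (computed by chasing previously computed pointers), a chain-length dynamic program over those pointers, and the left pass obtained by running the same helper on the reversed list.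
import Mathlib
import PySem

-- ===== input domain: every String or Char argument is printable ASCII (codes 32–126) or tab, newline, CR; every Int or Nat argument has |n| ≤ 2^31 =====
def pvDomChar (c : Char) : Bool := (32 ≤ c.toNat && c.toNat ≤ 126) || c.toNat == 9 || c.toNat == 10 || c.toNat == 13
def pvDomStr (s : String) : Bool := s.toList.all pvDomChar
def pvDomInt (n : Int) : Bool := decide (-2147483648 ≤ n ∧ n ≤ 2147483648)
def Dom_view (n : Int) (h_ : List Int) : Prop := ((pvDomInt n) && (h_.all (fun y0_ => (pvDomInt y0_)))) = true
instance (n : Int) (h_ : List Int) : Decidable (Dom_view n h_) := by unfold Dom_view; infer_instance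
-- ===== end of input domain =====

-- B computes the same function without A's monotonic stacks: jump-pointer 'next strictly greater' arrays plus a chain-length DP, the left pass reusing the same helper on the reversed list (alternative algorithm, similar cost).
-- ===== PORT A =====
-- A's two stack loops are textually identical apart from the first-iteration test (i == n-1 resp. i == 0),
-- so they share this helper.  The Python stack is modelled with its TOP AT THE HEAD of the Lean list:
-- append = cons, stack[-1] = head, pop = tail, and the 'while len(stack) and h[i] >= stack[-1]: pop' loop
-- is dropWhile from the head.  The '[]' branch of the match (stack_r[-1] on an empty stack: Python
-- IndexError) is unreachable: the stack is nonempty after the first iteration.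
def viewStep (first : Int) (h_ : List Int) (st : List Int × List Int) (i : Int) : List Int × List Int :=
  let right' := st.1.set i.toNat ((st.2.length : Int))     -- right[i] = len(stack)
  let x := PySem.List.pyGetD h_ i 0                        -- h[i] (in range under Pre_)
  let stack' :=
    if i = first then x :: st.2
    else match st.2 with
      | t :: _ => if x < t then x :: st.2
                  else x :: st.2.dropWhile (fun t => decide (t ≤ x))
      | [] => x :: st.2.dropWhile (fun t => decide (t ≤ x))   -- unreachable (see above)
  (right', stack')

def view (n : Int) (h_ : List Int) : List Int :=
  let rr := (PySem.List.pyRange (n-1) (-1) (-1)).foldl (viewStep (n-1) h_)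
              (List.replicate n.toNat 0, [])               -- right = [0]*n, stack_r = []
  let ll := (PySem.List.pyRange 0 n 1).foldl (viewStep 0 h_)
              (List.replicate n.toNat 0, [])               -- left = [0]*n, stack_l = []
  (PySem.List.pyRange 0 n 1).foldl
    (fun v i => v ++ [PySem.List.pyGetD ll.1 i 0 + PySem.List.pyGetD rr.1 i 0 + 1]) []

-- ===== PORT B =====
-- B-side helpers (port of Source B's _chain and its inner while loop).
-- viewChase is the pointer-chasing 'while k != -1 and h[k] <= h[j]: k = nxt[k]' loop; the fuel
-- argument only makes the recursion structural (each jump strictly increases k, so fuel n+1 is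
-- never exhausted — proved in the lemmas below); on exhaustion it returns the current k.
def viewChase (L arr : List Int) (x : Int) : Nat → Int → Int
  | 0, k => k
  | fuel + 1, k =>
      if k ≠ -1 ∧ PySem.List.pyGetD L k 0 ≤ x then
        viewChase L arr x fuel (PySem.List.pyGetD arr k 0)
      else k

-- _chain(n, h): nxt = jump-pointer 'next strictly greater' array, then the chain-length DP c
def viewChain (n : Int) (L : List Int) : List Int :=
  let nxt := (PySem.List.pyRange (n - 2) (-1) (-1)).foldl
      (fun arr j => arr.set j.toNat
          (viewChase L arr (PySem.List.pyGetD L j 0) (n.toNat + 1) (j + 1)))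
      (List.replicate n.toNat (-1))
  (PySem.List.pyRange (n - 1) (-1) (-1)).foldl
      (fun c j =>
        let nj := PySem.List.pyGetD nxt j 0
        c.set j.toNat (1 + (if nj ≠ -1 then PySem.List.pyGetD c nj 0 else 0)))
      (List.replicate n.toNat 0)

def view_alt (n : Int) (h_ : List Int) : List Int :=
  let cr := viewChain n h_
  let cl := (viewChain n ((PySem.List.slice h_ none (some n)).reverse)).reverse  -- h[:n][::-1]; cl.reverse()
  (PySem.List.pyRange 0 n 1).foldl
    (fun out i =>
      out ++ [(if i - 1 ≥ 0 then PySem.List.pyGetD cl (i - 1) 0 else 0)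
            + (if i + 1 < n then PySem.List.pyGetD cr (i + 1) 0 else 0) + 1]) []

-- ===== PRECONDITION & SPEC =====
-- Pre_ excludes exactly the inputs where Python A raises IndexError (h[i] with 1 ≤ n > len(h)).
def Pre_view (n : Int) (h_ : List Int) : Prop := n ≤ (h_.length : Int)
instance (n : Int) (h_ : List Int) : Decidable (Pre_view n h_) := by unfold Pre_view; infer_instance
def pvWitness_view : Int × List Int := (4, [2, 1, 3, 3])
def Spec_view (n : Int) (h_ : List Int) (out : List Int) : Prop := out = view_alt n h_
instance (n : Int) (h_ : List Int) (out : List Int) : Decidable (Spec_view n h_ out) := by unfold Spec_view; infer_instance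

-- ===== CLAIM (what is proved, stated in full; the proofs are below) =====
def Claim_equal_view : Prop := ∀ (n : Int) (h_ : List Int), Dom_view n h_ → Pre_view n h_ → Spec_view n h_ (view n h_)

-- ===== LEMMAS AND PROOFS =====

def pvSpine : List Int → List Int
  | [] => []
  | x :: xs => x :: (pvSpine xs).dropWhile (fun t => decide (t ≤ x))
def pvRightVal (hs : List Int) (k : Nat) : Int := ((pvSpine (hs.drop (k + 1))).length : Int)
def pvLeftVal (hs : List Int) (k : Nat) : Int := ((pvSpine ((hs.take k).reverse)).length : Int)
def pvFillR (hs : List Int) (r : List Int) : Nat → List Int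
  | 0 => r.set 0 (pvRightVal hs 0)
  | k + 1 => pvFillR hs (r.set (k + 1) (pvRightVal hs (k + 1))) k
def pvFillL (hs : List Int) (r : List Int) (j : Nat) : Nat → List Int
  | 0 => r
  | k + 1 => pvFillL hs (r.set j (pvLeftVal hs j)) (j + 1) k

lemma pvDropWhile_le_le (x m : Int) (hxm : x ≤ m) (l : List Int) :
    (l.dropWhile (fun t => decide (t ≤ x))).dropWhile (fun t => decide (t ≤ m))
      = l.dropWhile (fun t => decide (t ≤ m)) := by
  induction l with
  | nil => rfl
  | cons a l ih =>
    by_cases hax : a ≤ x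
    · simp [hax, le_trans hax hxm, ih]
    · simp [List.dropWhile_cons, hax]

lemma pvSpine_drop (hs : List Int) (k : Nat) (hk : k < hs.length) :
    pvSpine (hs.drop k)
      = hs[k] :: (pvSpine (hs.drop (k + 1))).dropWhile (fun t => decide (t ≤ hs[k])) := by
  rw [List.drop_eq_getElem_cons hk]; rfl

lemma viewStep_eq (first : Int) (h2 : List Int) (st : List Int × List Int) (i : Int)
    (hfirst : i = first → st.2 = []) :
    viewStep first h2 st i
      = (st.1.set i.toNat ((st.2.length : Int)),
         PySem.List.pyGetD h2 i 0 ::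
           st.2.dropWhile (fun t => decide (t ≤ PySem.List.pyGetD h2 i 0))) := by
  unfold viewStep
  by_cases hif : i = first
  · simp [hif, hfirst hif]
  · simp only [if_neg hif]
    match hst : st.2 with
    | [] => rfl
    | t :: rest =>
      by_cases hx : PySem.List.pyGetD h2 i 0 < t
      · simp [hx, List.dropWhile_cons, not_le.mpr hx]
      · simp [hx]

lemma pvGetD_eq (hs : List Int) (k : Nat) (hk : k < hs.length) :
    PySem.List.pyGetD hs (k : Int) 0 = hs[k] := by
  rw [PySem.List.pyGetD_of_nonneg _ _ (by omega)]
  simp [List.getD, List.getElem?_eq_getElem hk]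

lemma pvGetD_take (l : List Int) (mm : Nat) (i : Int) (h0 : 0 ≤ i) (hi : i < (mm : Int)) :
    PySem.List.pyGetD l i 0 = PySem.List.pyGetD (l.take mm) i 0 := by
  rw [PySem.List.pyGetD_of_nonneg _ _ h0, PySem.List.pyGetD_of_nonneg _ _ h0]
  simp only [List.getD]
  rw [List.getElem?_take_of_lt (by omega)]

lemma pvGetD_set (r : List Int) (i j : Nat) (v : Int) :
    (r.set i v).getD j 0 = if i = j ∧ j < r.length then v else r.getD j 0 := by
  simp only [List.getD, List.getElem?_set]
  by_cases hij : i = j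
  · by_cases hlen : j < r.length
    · simp [hij, hlen]
    · simp [hij, hlen, List.getElem?_eq_none (show r.length ≤ j by omega)]
  · simp [hij]

lemma pvLoopR (hs : List Int) :
    ∀ (i : Nat), i < hs.length → ∀ (r : List Int),
      (PySem.List.pyRange (i : Int) (-1) (-1)).foldl (viewStep ((hs.length : Int) - 1) hs)
          (r, pvSpine (hs.drop (i + 1)))
        = (pvFillR hs r i, pvSpine hs) := by
  intro i
  induction i with
  | zero =>
    intro hi r
    rw [PySem.List.pyRange_neg_one_cons (by omega)]
    have hnil : PySem.List.pyRange ((0:Nat) - 1 : Int) (-1) (-1) = [] :=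
      PySem.List.pyRange_neg_one_eq_nil (by omega)
    rw [hnil]
    simp only [List.foldl_cons, List.foldl_nil]
    rw [viewStep_eq _ _ _ _ (fun _ => by
      have hd : List.drop (0 + 1) hs = [] := List.drop_eq_nil_of_le (by omega)
      rw [hd]; rfl)]
    rw [pvGetD_eq hs 0 hi]
    have hh := pvSpine_drop hs 0 hi
    simp only [List.drop_zero] at hh
    rw [show ((0:Nat):Int).toNat = 0 from rfl, ← hh]
    rfl
  | succ k ih =>
    intro hi r
    rw [PySem.List.pyRange_neg_one_cons (by omega)]
    simp only [List.foldl_cons]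
    rw [viewStep_eq _ _ _ _ (fun _ => by
      have hd : List.drop (k + 1 + 1) hs = [] := List.drop_eq_nil_of_le (by omega)
      rw [hd]; rfl)]
    rw [pvGetD_eq hs (k+1) hi]
    have hcast : ((k + 1 : Nat) : Int) - 1 = (k : Int) := by push_cast; ring
    have htn : ((k + 1 : Nat) : Int).toNat = k + 1 := by omega
    rw [hcast, htn, ← pvSpine_drop hs (k+1) hi]
    rw [ih (by omega) (r.set (k + 1) ((pvSpine (List.drop (k + 1 + 1) hs)).length : Int))]
    rfl

lemma pvLoopL (hs : List Int) :
    ∀ (k j : Nat), j + k = hs.length → ∀ (r : List Int),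
      (PySem.List.pyRange (j : Int) ((hs.length : Int)) 1).foldl (viewStep 0 hs)
          (r, pvSpine ((hs.take j).reverse))
        = (pvFillL hs r j k, pvSpine hs.reverse) := by
  intro k
  induction k with
  | zero =>
    intro j hj r
    rw [PySem.List.pyRange_one_eq_nil (by omega)]
    have : j = hs.length := by omega
    simp [this, pvFillL]
  | succ k ih =>
    intro j hj r
    rw [PySem.List.pyRange_one_cons (by omega)]
    simp only [List.foldl_cons]
    rw [viewStep_eq _ _ _ _ (fun h0 => by
      have : j = 0 := by exact_mod_cast h0
      simp [this]; rfl)]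
    rw [pvGetD_eq hs j (by omega)]
    have hrev : (hs.take (j+1)).reverse = hs[j] :: (hs.take j).reverse := by
      rw [List.take_add_one, List.getElem?_eq_getElem (by omega)]
      simp
    have hsp : pvSpine ((hs.take (j+1)).reverse)
        = hs[j] :: (pvSpine ((hs.take j).reverse)).dropWhile (fun t => decide (t ≤ hs[j])) := by
      rw [hrev]; rfl
    have hcast : ((j : Int) + 1) = ((j + 1 : Nat) : Int) := by push_cast; ring
    rw [hcast, ← hsp, ih (j+1) (by omega)]
    have htn : ((j : Nat) : Int).toNat = j := by omega
    rw [htn]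
    rfl

lemma pvFillR_getD (hs : List Int) :
    ∀ (k : Nat) (r : List Int) (j : Nat), j < r.length → k < r.length →
      (pvFillR hs r k).getD j 0 = if j ≤ k then pvRightVal hs j else r.getD j 0 := by
  intro k
  induction k with
  | zero =>
    intro r j hj hk
    rw [pvFillR, pvGetD_set]
    by_cases h0 : j = 0
    · subst h0; rw [if_pos ⟨rfl, hj⟩, if_pos (le_refl 0)]
    · rw [if_neg (fun hc => h0 hc.1.symm), if_neg (by omega)]
  | succ k ih =>
    intro r j hj hk
    rw [pvFillR, ih _ j (by simpa using hj) (by rw [List.length_set]; omega), pvGetD_set]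
    by_cases hle : j ≤ k
    · rw [if_pos hle, if_pos (by omega)]
    · rw [if_neg hle]
      by_cases heq : j = k + 1
      · subst heq; rw [if_pos ⟨rfl, hj⟩, if_pos (le_refl _)]
      · rw [if_neg (fun hc => heq hc.1.symm), if_neg (by omega)]

lemma pvFillL_getD (hs : List Int) :
    ∀ (k : Nat) (r : List Int) (j i : Nat), i < r.length →
      (pvFillL hs r j k).getD i 0
        = if j ≤ i ∧ i < j + k then pvLeftVal hs i else r.getD i 0 := by
  intro k
  induction k with
  | zero =>
    intro r j i hi
    rw [pvFillL, if_neg (by omega)]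
  | succ k ih =>
    intro r j i hi
    rw [pvFillL, ih _ (j+1) i (by simpa using hi), pvGetD_set]
    by_cases hin : j + 1 ≤ i ∧ i < j + 1 + k
    · rw [if_pos hin, if_pos (by omega)]
    · rw [if_neg hin]
      by_cases heq : j = i
      · subst heq; rw [if_pos ⟨rfl, hi⟩, if_pos (by omega)]
      · rw [if_neg (fun hc => heq hc.1), if_neg (by omega)]
lemma viewStep_take (first : Int) (l : List Int) (mm : Nat) (st : List Int × List Int) (i : Int)
    (h0 : 0 ≤ i) (hi : i < (mm : Int)) :
    viewStep first l st i = viewStep first (l.take mm) st i := by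
  unfold viewStep; rw [pvGetD_take l mm i h0 hi]

-- ===== B-side lemmas =====
-- first index k' ≥ k below mm with L[k'] > x, else -1 (the value the nxt/prv arrays hold)
def pvFirstGt (L : List Int) (mm : Nat) (x : Int) (k : Nat) : Int :=
  if k < mm then (if x < L.getD k 0 then (k : Int) else pvFirstGt L mm x (k + 1)) else -1
termination_by mm - k

lemma pvFirstGt_neg_all (L : List Int) (mm : Nat) (x : Int) :
    ∀ (k : Nat), pvFirstGt L mm x k = -1 →
      ∀ k', k ≤ k' → k' < mm → L.getD k' 0 ≤ x := by
  have main : ∀ (d k : Nat), mm - k ≤ d → pvFirstGt L mm x k = -1 →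
      ∀ k', k ≤ k' → k' < mm → L.getD k' 0 ≤ x := by
    intro d
    induction d with
    | zero => intro k hk hneg k' h1 h2; exact absurd h2 (by omega)
    | succ d ihd =>
      intro k hk hneg k' h1 h2
      rw [pvFirstGt] at hneg
      by_cases hkm : k < mm
      · rw [if_pos hkm] at hneg
        by_cases hx : x < L.getD k 0
        · rw [if_pos hx] at hneg; exact absurd hneg (by omega)
        · rw [if_neg hx] at hneg
          by_cases hkk : k = k'
          · subst hkk; exact not_lt.mp hx
          · exact ihd (k + 1) (by omega) hneg k' (by omega) h2
      · exact absurd h2 (by omega)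
  exact fun k h k' h1 h2 => main (mm - k) k (le_refl _) h k' h1 h2

lemma pvFirstGt_eq_neg (L : List Int) (mm : Nat) (x : Int) :
    ∀ (k : Nat), (∀ k', k ≤ k' → k' < mm → L.getD k' 0 ≤ x) →
      pvFirstGt L mm x k = -1 := by
  have main : ∀ (d k : Nat), mm - k ≤ d →
      (∀ k', k ≤ k' → k' < mm → L.getD k' 0 ≤ x) → pvFirstGt L mm x k = -1 := by
    intro d
    induction d with
    | zero =>
      intro k hk hall
      rw [pvFirstGt, if_neg (by omega)]
    | succ d ihd =>
      intro k hk hall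
      rw [pvFirstGt]
      by_cases hkm : k < mm
      · rw [if_pos hkm, if_neg (not_lt.mpr (hall k (le_refl _) hkm))]
        exact ihd (k + 1) (by omega) (fun k' h1 h2 => hall k' (by omega) h2)
      · rw [if_neg hkm]
  exact fun k h => main (mm - k) k (le_refl _) h

lemma pvFirstGt_pos (L : List Int) (mm : Nat) (x : Int) :
    ∀ (k : Nat), pvFirstGt L mm x k ≠ -1 →
      ∃ k2 : Nat, pvFirstGt L mm x k = (k2 : Int) ∧ k ≤ k2 ∧ k2 < mm ∧ x < L.getD k2 0 ∧
        (∀ k', k ≤ k' → k' < k2 → L.getD k' 0 ≤ x) := by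
  have main : ∀ (d k : Nat), mm - k ≤ d → pvFirstGt L mm x k ≠ -1 →
      ∃ k2 : Nat, pvFirstGt L mm x k = (k2 : Int) ∧ k ≤ k2 ∧ k2 < mm ∧ x < L.getD k2 0 ∧
        (∀ k', k ≤ k' → k' < k2 → L.getD k' 0 ≤ x) := by
    intro d
    induction d with
    | zero =>
      intro k hk hne
      rw [pvFirstGt, if_neg (by omega)] at hne
      exact absurd rfl hne
    | succ d ihd =>
      intro k hk hne
      rw [pvFirstGt] at hne ⊢
      by_cases hkm : k < mm
      · rw [if_pos hkm] at hne ⊢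
        by_cases hx : x < L.getD k 0
        · rw [if_pos hx]
          exact ⟨k, rfl, le_refl _, hkm, hx, fun k' h1 h2 => absurd h2 (by omega)⟩
        · rw [if_neg hx] at hne ⊢
          obtain ⟨k2, he, h1, h2, h3, h4⟩ := ihd (k + 1) (by omega) hne
          refine ⟨k2, he, by omega, h2, h3, fun k' hk1 hk2 => ?_⟩
          by_cases hkk : k = k'
          · subst hkk; exact not_lt.mp hx
          · exact h4 k' (by omega) hk2
      · rw [if_neg hkm] at hne
        exact absurd rfl hne
  exact fun k h => main (mm - k) k (le_refl _) h

lemma pvFirstGt_skip (L : List Int) (mm : Nat) (x : Int) :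
    ∀ (d k k2 : Nat), k2 - k ≤ d → k ≤ k2 → k2 ≤ mm →
      (∀ k', k ≤ k' → k' < k2 → L.getD k' 0 ≤ x) →
      pvFirstGt L mm x k = pvFirstGt L mm x k2 := by
  intro d
  induction d with
  | zero =>
    intro k k2 hd h1 h2 hall
    have : k = k2 := by omega
    rw [this]
  | succ d ihd =>
    intro k k2 hd h1 h2 hall
    by_cases hkk : k = k2
    · rw [hkk]
    · have hklt : k < k2 := by omega
      rw [pvFirstGt, if_pos (by omega), if_neg (not_lt.mpr (hall k (le_refl _) hklt))]
      exact ihd (k + 1) k2 (by omega) (by omega) h2 (fun k' ha hb => hall k' (by omega) hb)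
lemma pvChase (L arr : List Int) (mm : Nat) (x : Int) (jl : Nat)
    (hmL : mm ≤ L.length)
    (harr : ∀ k' : Nat, jl < k' → k' < mm →
      arr.getD k' 0 = pvFirstGt L mm (L.getD k' 0) (k' + 1)) :
    ∀ (fuel : Nat) (ki : Int),
      (ki = -1 ∧ 1 ≤ fuel) ∨ (∃ k : Nat, ki = (k : Int) ∧ jl < k ∧ k < mm ∧ mm + 1 - k ≤ fuel) →
      viewChase L arr x fuel ki = (if ki = -1 then -1 else pvFirstGt L mm x ki.toNat) := by
  intro fuel
  induction fuel with
  | zero =>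
    intro ki hki
    rcases hki with ⟨_, h⟩ | ⟨k, _, _, hk, hf⟩
    · omega
    · omega
  | succ fuel ih =>
    intro ki hki
    rcases hki with ⟨hk1, _⟩ | ⟨k, hkek, hjl, hkm, hf⟩
    · subst hk1
      show (if (-1 : Int) ≠ -1 ∧ _ then _ else _) = _
      rw [if_neg (by simp), if_pos rfl]
    · subst hkek
      have hget : PySem.List.pyGetD L (k : Int) 0 = L.getD k 0 := by
        rw [PySem.List.pyGetD_of_nonneg _ _ (by omega), Int.toNat_natCast]
      show (if ((k : Int)) ≠ -1 ∧ PySem.List.pyGetD L (k : Int) 0 ≤ x then _ else _) = _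
      by_cases hx : x < L.getD k 0
      · rw [if_neg (by rw [hget]; exact fun hc => absurd hc.2 (not_le.mpr hx)),
            if_neg (by omega : ¬ ((k : Int)) = -1), Int.toNat_natCast,
            pvFirstGt, if_pos hkm, if_pos hx]
      · rw [if_pos ⟨by omega, by rw [hget]; exact not_lt.mp hx⟩]
        have harrk : PySem.List.pyGetD arr (k : Int) 0
            = pvFirstGt L mm (L.getD k 0) (k + 1) := by
          rw [PySem.List.pyGetD_of_nonneg _ _ (by omega), Int.toNat_natCast]
          exact harr k hjl hkm
        rw [harrk]
        by_cases hneg : pvFirstGt L mm (L.getD k 0) (k + 1) = -1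
        · rw [hneg, ih (-1) (Or.inl ⟨rfl, by omega⟩), if_pos rfl,
              if_neg (by omega : ¬ ((k : Int)) = -1), Int.toNat_natCast]
          have hall : ∀ k', k + 1 ≤ k' → k' < mm → L.getD k' 0 ≤ x :=
            fun k' h1 h2 => le_trans (pvFirstGt_neg_all L mm _ (k + 1) hneg k' h1 h2) (not_lt.mp hx)
          rw [show pvFirstGt L mm x k = pvFirstGt L mm x (k + 1) from by
            rw [pvFirstGt, if_pos hkm, if_neg hx]]
          exact (pvFirstGt_eq_neg L mm x (k + 1) hall).symm
        · obtain ⟨k2, he, h1, h2, h3, h4⟩ := pvFirstGt_pos L mm _ (k + 1) hneg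
          rw [he, ih (k2 : Int) (Or.inr ⟨k2, rfl, by omega, h2, by omega⟩),
              if_neg (by omega : ¬ ((k2 : Int)) = -1),
              if_neg (by omega : ¬ ((k : Int)) = -1), Int.toNat_natCast, Int.toNat_natCast]
          rw [show pvFirstGt L mm x k = pvFirstGt L mm x (k + 1) from by
            rw [pvFirstGt, if_pos hkm, if_neg hx]]
          exact (pvFirstGt_skip L mm x (k2 - (k + 1)) (k + 1) k2 (by omega) h1 (by omega)
            (fun k' ha hb => le_trans (h4 k' ha hb) (not_lt.mp hx))).symm
lemma pvLoopNxt (L : List Int) (mm : Nat) (hmL : mm ≤ L.length) :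
    ∀ (j : Nat), j + 2 ≤ mm → ∀ (arr : List Int), arr.length = mm →
      (∀ k' : Nat, j < k' → k' < mm →
        arr.getD k' 0 = pvFirstGt L mm (L.getD k' 0) (k' + 1)) →
      (((PySem.List.pyRange (j : Int) (-1) (-1)).foldl
          (fun a i => a.set i.toNat
            (viewChase L a (PySem.List.pyGetD L i 0) (mm + 1) (i + 1))) arr).length = mm
       ∧ ∀ k' : Nat, k' < mm →
          ((PySem.List.pyRange (j : Int) (-1) (-1)).foldl
            (fun a i => a.set i.toNat
              (viewChase L a (PySem.List.pyGetD L i 0) (mm + 1) (i + 1))) arr).getD k' 0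
            = pvFirstGt L mm (L.getD k' 0) (k' + 1)) := by
  intro j
  induction j with
  | zero =>
    intro hj arr hlen harr
    rw [PySem.List.pyRange_neg_one_cons (by omega),
        show ((0:Nat):Int) - 1 = -1 by ring, PySem.List.pyRange_neg_one_eq_nil (by omega)]
    simp only [List.foldl_cons, List.foldl_nil]
    have hch : viewChase L arr (PySem.List.pyGetD L ((0:Nat):Int) 0) (mm + 1) (((0:Nat):Int) + 1)
        = pvFirstGt L mm (L.getD 0 0) 1 := by
      rw [show (((0:Nat):Int) + 1) = ((1:Nat):Int) from by omega,
          pvChase L arr mm _ 0 hmL (fun k' h1 h2 => harr k' h1 h2) (mm + 1) ((1:Nat):Int)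
            (Or.inr ⟨1, rfl, by omega, by omega, by omega⟩),
          if_neg (by omega : ¬ (((1:Nat):Int)) = -1), Int.toNat_natCast,
          PySem.List.pyGetD_of_nonneg _ _ (by omega), Int.toNat_natCast]
    rw [hch]
    refine ⟨by simpa using hlen, fun k' hk' => ?_⟩
    rw [show ((0:Nat):Int).toNat = 0 from rfl, pvGetD_set]
    by_cases h0 : k' = 0
    · subst h0; rw [if_pos ⟨rfl, by omega⟩]
    · rw [if_neg (fun hc => h0 hc.1.symm)]
      exact harr k' (by omega) hk'
  | succ j ihj =>
    intro hj arr hlen harr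
    rw [PySem.List.pyRange_neg_one_cons (by omega)]
    simp only [List.foldl_cons]
    have hch : viewChase L arr (PySem.List.pyGetD L ((j+1 : Nat):Int) 0) (mm + 1)
          (((j+1 : Nat):Int) + 1)
        = pvFirstGt L mm (L.getD (j+1) 0) (j + 2) := by
      rw [show (((j+1:Nat):Int) + 1) = ((j+2:Nat):Int) from by omega,
          pvChase L arr mm _ (j+1) hmL (fun k' h1 h2 => harr k' h1 h2) (mm + 1) ((j+2:Nat):Int)
            (Or.inr ⟨j+2, rfl, by omega, by omega, by omega⟩),
          if_neg (by omega : ¬ (((j+2:Nat):Int)) = -1), Int.toNat_natCast,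
          PySem.List.pyGetD_of_nonneg _ _ (by omega), Int.toNat_natCast]
    rw [hch, show ((j+1 : Nat):Int) - 1 = ((j:Nat):Int) from by omega,
        show ((j+1 : Nat):Int).toNat = j + 1 from by omega]
    apply ihj (by omega)
    · simpa using hlen
    · intro k' h1 h2
      rw [pvGetD_set]
      by_cases he : k' = j + 1
      · subst he; rw [if_pos ⟨rfl, by omega⟩]
      · rw [if_neg (fun hc => he hc.1.symm)]
        exact harr k' (by omega) h2
lemma pvSpine_seg (x : Int) : ∀ (seg rest : List Int), (∀ v ∈ seg, v ≤ x) →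
    (pvSpine (seg ++ rest)).dropWhile (fun t => decide (t ≤ x))
      = (pvSpine rest).dropWhile (fun t => decide (t ≤ x)) := by
  intro seg
  induction seg with
  | nil => intro rest _; rfl
  | cons a s ih =>
    intro rest hall
    have hax : a ≤ x := hall a (by simp)
    show (pvSpine (a :: (s ++ rest))).dropWhile _ = _
    rw [pvSpine]
    rw [List.dropWhile_cons_of_pos (by simpa using hax), pvDropWhile_le_le a x hax]
    exact ih rest (fun v hv => hall v (by simp [hv]))

lemma pvCrRec (L : List Int) (mm : Nat) (hmL : mm ≤ L.length) (j : Nat) (hj : j < mm) :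
    ((pvSpine ((L.take mm).drop j)).length : Int)
      = 1 + (if pvFirstGt L mm (L.getD j 0) (j + 1) = -1 then 0
             else ((pvSpine ((L.take mm).drop
                (pvFirstGt L mm (L.getD j 0) (j + 1)).toNat)).length : Int)) := by
  have hlen : (L.take mm).length = mm := by rw [List.length_take]; omega
  have hjs : j < (L.take mm).length := by omega
  have hsel : ∀ (k : Nat) (hk : k < (L.take mm).length), (L.take mm)[k] = L.getD k 0 := by
    intro k hk
    rw [List.getElem_take, List.getD_eq_getElem L 0 (by omega)]
  have hmem : ∀ (ub : Nat), ub ≤ mm →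
      (∀ k', j + 1 ≤ k' → k' < ub → L.getD k' 0 ≤ L.getD j 0) →
      ∀ v ∈ ((L.take mm).drop (j+1)).take (ub - (j+1)), v ≤ L.getD j 0 := by
    intro ub hub hall v hv
    obtain ⟨t, ht, rfl⟩ := List.mem_iff_getElem.mp hv
    rw [List.getElem_take, List.getElem_drop]
    have htb : j + 1 + t < ub := by
      have := ht
      simp only [List.length_take, List.length_drop] at this
      omega
    rw [hsel (j+1+t) (by omega)]
    exact hall (j+1+t) (by omega) htb
  rw [pvSpine_drop (L.take mm) j hjs, hsel j hjs]
  by_cases hneg : pvFirstGt L mm (L.getD j 0) (j + 1) = -1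
  · rw [if_pos hneg]
    have hall := pvFirstGt_neg_all L mm _ (j + 1) hneg
    have hseg : (L.take mm).drop (j+1) = ((L.take mm).drop (j+1)).take (mm - (j+1)) ++ [] := by
      rw [List.append_nil]
      exact (List.take_of_length_le (by simp [hlen])).symm
    have hdw : (pvSpine ((L.take mm).drop (j+1))).dropWhile
        (fun t => decide (t ≤ L.getD j 0)) = [] := by
      rw [hseg, pvSpine_seg _ _ [] (hmem mm (le_refl _) hall)]
      rfl
    rw [hdw]
    norm_num
  · obtain ⟨k2, he, h1, h2, h3, h4⟩ := pvFirstGt_pos L mm _ (j + 1) hneg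
    rw [if_neg hneg, he, Int.toNat_natCast]
    have hsplit : (L.take mm).drop (j+1)
        = ((L.take mm).drop (j+1)).take (k2 - (j+1)) ++ (L.take mm).drop k2 := by
      conv_lhs => rw [← List.take_append_drop (k2 - (j+1)) ((L.take mm).drop (j+1))]
      rw [List.drop_drop]
      congr 2
      omega
    rw [hsplit, pvSpine_seg _ _ _ (hmem k2 (by omega) h4)]
    have hk2s : k2 < (L.take mm).length := by omega
    rw [pvSpine_drop (L.take mm) k2 hk2s, hsel k2 hk2s,
        List.dropWhile_cons_of_neg (by simpa using h3)]
    simp only [List.length_cons]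
    push_cast
    ring
lemma pvLoopC (L : List Int) (mm : Nat) (hmL : mm ≤ L.length) (nxt : List Int)
    (hnxt : ∀ k' : Nat, k' < mm → nxt.getD k' 0 = pvFirstGt L mm (L.getD k' 0) (k' + 1)) :
    ∀ (j : Nat), j < mm → ∀ (c : List Int), c.length = mm →
      (∀ k' : Nat, j < k' → k' < mm →
        c.getD k' 0 = ((pvSpine ((L.take mm).drop k')).length : Int)) →
      (((PySem.List.pyRange (j : Int) (-1) (-1)).foldl
          (fun c i =>
            let nj := PySem.List.pyGetD nxt i 0
            c.set i.toNat (1 + (if nj ≠ -1 then PySem.List.pyGetD c nj 0 else 0))) c).length = mm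
       ∧ ∀ k' : Nat, k' < mm →
          ((PySem.List.pyRange (j : Int) (-1) (-1)).foldl
            (fun c i =>
              let nj := PySem.List.pyGetD nxt i 0
              c.set i.toNat (1 + (if nj ≠ -1 then PySem.List.pyGetD c nj 0 else 0))) c).getD k' 0
            = ((pvSpine ((L.take mm).drop k')).length : Int)) := by
  have hstep : ∀ (i : Nat), i < mm → ∀ (c : List Int), c.length = mm →
      (∀ k' : Nat, i < k' → k' < mm →
        c.getD k' 0 = ((pvSpine ((L.take mm).drop k')).length : Int)) →
      (1 + (if PySem.List.pyGetD nxt ((i : Nat) : Int) 0 ≠ -1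
            then PySem.List.pyGetD c (PySem.List.pyGetD nxt ((i : Nat) : Int) 0) 0 else 0))
        = ((pvSpine ((L.take mm).drop i)).length : Int) := by
    intro i hi c hlen hc
    have hn : PySem.List.pyGetD nxt ((i : Nat) : Int) 0
        = pvFirstGt L mm (L.getD i 0) (i + 1) := by
      rw [PySem.List.pyGetD_of_nonneg _ _ (by omega), Int.toNat_natCast]
      exact hnxt i hi
    rw [hn, pvCrRec L mm hmL i hi]
    by_cases hneg : pvFirstGt L mm (L.getD i 0) (i + 1) = -1
    · rw [if_pos hneg, hneg, if_neg (by simp)]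
    · obtain ⟨k2, he, h1, h2, h3, h4⟩ := pvFirstGt_pos L mm _ (i + 1) hneg
      rw [if_neg hneg, he, Int.toNat_natCast, if_pos (by omega : ((k2 : Nat) : Int) ≠ -1)]
      rw [PySem.List.pyGetD_of_nonneg _ _ (by omega), Int.toNat_natCast]
      rw [hc k2 (by omega) h2]
  intro j
  induction j with
  | zero =>
    intro hj c hlen hc
    rw [PySem.List.pyRange_neg_one_cons (by omega),
        show ((0:Nat):Int) - 1 = -1 by ring, PySem.List.pyRange_neg_one_eq_nil (by omega)]
    simp only [List.foldl_cons, List.foldl_nil]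
    refine ⟨by simpa using hlen, fun k' hk' => ?_⟩
    rw [show ((0:Nat):Int).toNat = 0 from rfl, pvGetD_set]
    by_cases h0 : k' = 0
    · subst h0
      rw [if_pos ⟨rfl, by omega⟩]
      exact hstep 0 hj c hlen hc
    · rw [if_neg (fun hcc => h0 hcc.1.symm)]
      exact hc k' (by omega) hk'
  | succ j ihj =>
    intro hj c hlen hc
    rw [PySem.List.pyRange_neg_one_cons (by omega)]
    simp only [List.foldl_cons]
    rw [show ((j+1 : Nat):Int) - 1 = ((j:Nat):Int) from by omega,
        show ((j+1 : Nat):Int).toNat = j + 1 from by omega]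
    apply ihj (by omega)
    · simpa using hlen
    · intro k' h1 h2
      rw [pvGetD_set]
      by_cases he : k' = j + 1
      · subst he
        rw [if_pos ⟨rfl, by omega⟩]
        exact hstep (j+1) hj c hlen hc
      · rw [if_neg (fun hcc => he hcc.1.symm)]
        exact hc k' (by omega) h2
lemma pvChain (L : List Int) (mm : Nat) (hm1 : 1 ≤ mm) (hmL : mm ≤ L.length) :
    (viewChain (mm : Int) L).length = mm ∧
    ∀ k' : Nat, k' < mm → (viewChain (mm : Int) L).getD k' 0
        = ((pvSpine ((L.take mm).drop k')).length : Int) := by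
  simp only [viewChain, Int.toNat_natCast]
  have hnxt : ∀ (nxt : List Int),
      nxt = (PySem.List.pyRange ((mm : Int) - 2) (-1) (-1)).foldl
        (fun arr j => arr.set j.toNat
          (viewChase L arr (PySem.List.pyGetD L j 0) (mm + 1) (j + 1)))
        (List.replicate mm (-1)) →
      nxt.length = mm ∧ ∀ k' : Nat, k' < mm →
        nxt.getD k' 0 = pvFirstGt L mm (L.getD k' 0) (k' + 1) := by
    intro nxt hdef
    have hrepl : ∀ k' : Nat, k' < mm → (List.replicate mm (-1 : Int)).getD k' 0 = -1 := by
      intro k' hk'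
      rw [List.getD_eq_getElem _ _ (by simpa using hk'), List.getElem_replicate]
    by_cases hm2 : 2 ≤ mm
    · rw [show (mm : Int) - 2 = ((mm - 2 : Nat) : Int) from by omega] at hdef
      have := pvLoopNxt L mm hmL (mm - 2) (by omega) (List.replicate mm (-1)) (by simp)
        (fun k' h1 h2 => by
          rw [hrepl k' h2, show k' = mm - 1 from by omega,
              show mm - 1 + 1 = mm from by omega, pvFirstGt, if_neg (by omega)])
      rw [← hdef] at this
      exact this
    · have hmm : mm = 1 := by omega
      subst hmm
      rw [show ((1 : Nat) : Int) - 2 = -1 from by omega, PySem.List.pyRange_neg_one_eq_nil (by omega)]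
        at hdef
      simp only [List.foldl_nil] at hdef
      subst hdef
      refine ⟨by simp, fun k' hk' => ?_⟩
      rw [hrepl k' hk', show k' = 0 from by omega, pvFirstGt, if_neg (by omega)]
  obtain ⟨hlen, hval⟩ := hnxt _ rfl
  rw [show (mm : Int) - 1 = ((mm - 1 : Nat) : Int) from by omega]
  exact pvLoopC L mm hmL _ hval (mm - 1) (by omega) (List.replicate mm 0) (by simp)
    (fun k' h1 h2 => absurd h2 (by omega))
lemma pvMain (n : Int) (h_ : List Int) (hpre : n ≤ (h_.length : Int)) :
    view n h_ = view_alt n h_ := by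
  by_cases hpos : 0 < n
  case neg =>
    simp only [view, view_alt, PySem.List.pyRange_one_eq_nil (show n ≤ 0 by omega)]
    simp
  case pos =>
    obtain ⟨m, hm⟩ : ∃ m : Nat, (m : Int) = n := ⟨n.toNat, by omega⟩
    subst hm
    have hm1 : 1 ≤ m := by exact_mod_cast hpos
    have hmlen : m ≤ h_.length := by exact_mod_cast hpre
    have hlen : (h_.take m).length = m := by rw [List.length_take]; omega
    -- A side loop characterisations
    have hcongR : ∀ i ∈ PySem.List.pyRange ((m : Int) - 1) (-1) (-1), ∀ acc,
        viewStep ((m : Int) - 1) h_ acc i = viewStep ((m : Int) - 1) (h_.take m) acc i := by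
      intro i hi acc
      rw [PySem.List.mem_pyRange_neg_one] at hi
      exact viewStep_take _ h_ m acc i (by omega) (by omega)
    have hcongL : ∀ i ∈ PySem.List.pyRange 0 (m : Int) 1, ∀ acc,
        viewStep 0 h_ acc i = viewStep 0 (h_.take m) acc i := by
      intro i hi acc
      rw [PySem.List.mem_pyRange_one] at hi
      exact viewStep_take _ h_ m acc i (by omega) (by omega)
    have hR := pvLoopR (h_.take m) (m - 1) (by omega) (List.replicate m 0)
    rw [show ((m - 1 : Nat) : Int) = (m : Int) - 1 by omega,
        show ((h_.take m).length : Int) - 1 = (m : Int) - 1 by rw [hlen],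
        show (h_.take m).drop (m - 1 + 1) = [] from List.drop_eq_nil_of_le (by omega),
        show pvSpine [] = [] from rfl] at hR
    have hL := pvLoopL (h_.take m) m 0 (by omega) (List.replicate m 0)
    rw [show ((0 : Nat) : Int) = 0 from rfl,
        show ((h_.take m).length : Int) = (m : Int) by rw [hlen],
        show pvSpine (((h_.take m).take 0).reverse) = [] from rfl] at hL
    -- B side chain characterisations
    obtain ⟨hcrlen, hcrval⟩ := pvChain h_ m hm1 hmlen
    have hrevlen : ((h_.take m).reverse).length = m := by simpa using hlen
    obtain ⟨hcllen, hclval⟩ := pvChain ((h_.take m).reverse) m hm1 (by omega)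
    have hrevtake : ((h_.take m).reverse).take m = (h_.take m).reverse :=
      List.take_of_length_le (by omega)
    rw [hrevtake] at hclval
    simp only [view, view_alt, Int.toNat_natCast, PySem.List.slice_to_natCast]
    rw [PySem.List.foldl_congr_mem' _ _ _ _ hcongR, PySem.List.foldl_congr_mem' _ _ _ _ hcongL,
        hR, hL]
    rw [PySem.List.foldl_append_singleton_eq_map, PySem.List.foldl_append_singleton_eq_map]
    simp only [List.nil_append]
    apply List.map_congr_left
    intro i hi
    rw [PySem.List.mem_pyRange_one] at hi
    have hij : i = ((i.toNat : Nat) : Int) := by omega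
    rw [hij]
    generalize i.toNat = j at *
    have hjm : j < m := by omega
    -- A-side entry values
    rw [PySem.List.pyGetD_of_nonneg _ _ (by omega : (0:Int) ≤ (j:Int)),
        PySem.List.pyGetD_of_nonneg _ _ (by omega : (0:Int) ≤ (j:Int)), Int.toNat_natCast]
    rw [pvFillL_getD _ m _ 0 j (by simpa using hjm),
        pvFillR_getD _ (m-1) _ j (by simpa using hjm) (by simp; omega)]
    rw [if_pos (by omega : 0 ≤ j ∧ j < 0 + m), if_pos (by omega : j ≤ m - 1)]
    -- B-side entry values
    have hrterm : (if (j : Int) + 1 < (m : Int) then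
          PySem.List.pyGetD (viewChain (m : Int) h_) ((j : Int) + 1) 0 else 0)
        = pvRightVal (h_.take m) j := by
      by_cases hj1 : j + 1 < m
      · rw [if_pos (by exact_mod_cast hj1),
            show ((j : Int) + 1) = ((j + 1 : Nat) : Int) from by omega,
            PySem.List.pyGetD_of_nonneg _ _ (by omega), Int.toNat_natCast,
            hcrval (j + 1) hj1]
        rfl
      · rw [if_neg (by exact_mod_cast hj1), pvRightVal,
            show (h_.take m).drop (j + 1) = [] from List.drop_eq_nil_of_le (by omega)]
        rfl
    have hlterm : (if (j : Int) - 1 ≥ 0 then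
          PySem.List.pyGetD ((viewChain (m : Int) ((h_.take m).reverse)).reverse)
            ((j : Int) - 1) 0 else 0)
        = pvLeftVal (h_.take m) j := by
      by_cases hj0 : 1 ≤ j
      · rw [if_pos (by omega : (j : Int) - 1 ≥ 0),
            show ((j : Int) - 1) = ((j - 1 : Nat) : Int) from by omega,
            PySem.List.pyGetD_of_nonneg _ _ (by omega), Int.toNat_natCast]
        have hjr : j - 1 < ((viewChain (m : Int) ((h_.take m).reverse)).reverse).length := by
          rw [List.length_reverse, hcllen]; omega
        rw [List.getD_eq_getElem _ _ hjr, List.getElem_reverse]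
        have hidx : (viewChain (m : Int) ((h_.take m).reverse)).length - 1 - (j - 1) = m - j := by
          rw [hcllen]; omega
        simp only [hidx]
        rw [← List.getD_eq_getElem _ 0 (by rw [hcllen]; omega),
            hclval (m - j) (by omega), List.drop_reverse, hlen,
            show m - (m - j) = j from by omega]
        rfl
      · rw [if_neg (by omega : ¬ ((j : Int) - 1 ≥ 0)),
            pvLeftVal, show j = 0 from by omega]
        rfl
    rw [hrterm, hlterm]


-- ===== VERDICT (by name: the statements are the Claim_ definitions above) =====
theorem view_spec : Claim_equal_view := by
  intro n h_ _ hpre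
  unfold Spec_view
  exact pvMain n h_ hpre
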